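-- pv_equiv track=rewrite | github.com/maggiecope/COMP-120 | comp120-sp23-s02-psa1-group2/dna_profiler.py | identify_dna
-- ===== SOURCE A (Python) =====
-- def find_max_consecutive(dna:str,target:str) -> int:
--     """This function will take in a DNA sequence and an STR and return the maximum number of times that STR appears consecutively in the sequence.
--
--
--     Parameters:
--     dna(str): The DNA strand to search for the STRs in
--     target(str): The STR that you are searching for
--
--     Returns:
--     max(int): maximum number of times the target STR shows up consecutively in the given DNA sequence.
--
--     >>> find_max_consecutive('ATAACACTT','AC')
--     2
--     >>> find_max_consecutive('AGACGGGTTACCATGACTATCTATCTATCTATCTATCTATCTATCTATCACGTACGTACGTATCGAGATAGATAGATAGATAGATCCTCGACTTCGATCGCAATGAATGCCAATAGACAAAA','AGAT')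
--     5
--
--     """
--     max_consecutive = 0
--     for i in range(len(dna)):
--         #count is reset to 0 and consecutive is reset to true
--         count = 0
--         consecutive = True
--         while consecutive ==True:
--             start = i + len(target) * count
--             end = start + len(target)
--             if dna[start:end] == target:
--                 #counts each time the target appears in the dna consecutively
--                 count +=1
--                 if count>max_consecutive:
--                     max_consecutive=count
--             else:
--                 #once the target does not appear, consecutive is set to false and the while loop comes to and end
--
--                 consecutive = False
--
--     return max_consecutive
--
-- def identify_dna(mystery_dna:str, STR:list ,profiles:dict) -> str:
--     """This function will take in the DNA profile data (which you processed in create_dna_profiles) and the DNA sequence to identify,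
--     and returns a string containing the person who matched that DNA sequence.
--
--     Return:
--     name(str):returns the name of the person that matches the given DNA sequence
--
--     >>> STR,profiles = create_dna_profiles('dna_database.csv')
--     >>> identify_dna('AGACGGGTTACCATGACTATCTATCTATCTATCTATCTATCTATCTATCACGTACGTACGTATCGAGATAGATAGATAGATAGATCCTCGACTTCGATCGCAATGAATGCCAATAGACAAAA',STR,profiles)
--     'Alice'
--
--     """
--     #creates a list of the max consecutive strs in mystery_dna
--     mystery_strs = []
--     for i in STR:
--         mystery_strs.append(find_max_consecutive(mystery_dna,i))
--     #checks to see if the values of each name in the dictionary profule match the myster_str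
--     for name in profiles:
--         if profiles[name]==mystery_strs:
--             #if they do match, returns the name of the profile with the matchinh str values
--             return name
--     #if none of the profiles in the profiles dictionary match mystery_strs returns "No match"
--     return "No match"
-- ===== SOURCE B (Python) =====
-- def _max_consecutive(dna, target):
--     # One linear pass per residue class: walk the chain r, r+t, r+2t, ...
--     # from right to left keeping the current run of consecutive matches.
--     n, t = len(dna), len(target)
--     best = 0
--     for r in range(t):
--         run = 0
--         for j in reversed(range(r, n, t)):
--             if dna[j:j + t] == target:
--                 run += 1
--                 if run > best:
--                     best = run
--             else:
--                 run = 0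
--     return best
--
--
-- def identify_dna(mystery_dna, STR, profiles):
--     counts = [_max_consecutive(mystery_dna, s) for s in STR]
--     for name, vals in profiles.items():
--         if vals == counts:
--             return name
--     return "No match"
-- ===== Notes on version B (the rewrite author's own statement) =====
-- stated objective: faster
-- what changed: B counts max consecutive repeats with one right-to-left run-tracking pass per residue class instead of A's restart-the-count-at-every-index nested scan, and matches the profile by iterating (name, values) items directly instead of per-key lookups.
import Mathlib
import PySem

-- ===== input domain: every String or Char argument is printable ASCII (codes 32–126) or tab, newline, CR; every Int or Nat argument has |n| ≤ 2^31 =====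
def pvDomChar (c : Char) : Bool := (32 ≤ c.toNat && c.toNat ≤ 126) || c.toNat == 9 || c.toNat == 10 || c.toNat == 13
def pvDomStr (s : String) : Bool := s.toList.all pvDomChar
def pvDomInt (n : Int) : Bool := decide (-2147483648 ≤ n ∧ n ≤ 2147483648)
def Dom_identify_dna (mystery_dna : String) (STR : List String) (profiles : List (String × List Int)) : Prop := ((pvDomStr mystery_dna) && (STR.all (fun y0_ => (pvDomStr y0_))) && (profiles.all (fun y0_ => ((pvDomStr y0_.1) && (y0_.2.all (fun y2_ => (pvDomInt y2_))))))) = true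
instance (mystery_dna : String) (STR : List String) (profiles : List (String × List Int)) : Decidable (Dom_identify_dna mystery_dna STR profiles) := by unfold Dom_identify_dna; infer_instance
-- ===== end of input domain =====

-- B replaces A's restart-at-every-index repeat counting by one right-to-left run-tracking
-- pass per residue class (alternative algorithm), and matches the profile by scanning items directly.

-- ===== PORT A =====
-- the inner 'while consecutive == True' loop of find_max_consecutive; the fuel argument only
-- totalizes the loop (len(dna)+1 steps always suffice when the target is non-empty; the
-- empty-target divergence is excluded by Pre_)
def pvAWhile (dl tl : List Char) (i : Int) : Nat → Int → Int → Int
  | 0, _, maxc => maxc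
  | fuel + 1, count, maxc =>
      let start := i + (tl.length : Int) * count
      if PySem.List.slice dl (some start) (some (start + (tl.length : Int))) = tl then
        pvAWhile dl tl i fuel (count + 1) (if count + 1 > maxc then count + 1 else maxc)
      else maxc

def find_max_consecutive (dna target : String) : Int :=
  (PySem.List.pyRange 0 (dna.toList.length : Int) 1).foldl
    (fun maxc i => pvAWhile dna.toList target.toList i (dna.toList.length + 1) 0 maxc) 0

-- 'for name in profiles: if profiles[name] == mystery_strs: return name'; the lookup
-- profiles[name] never raises since name is drawn from the dict's own keys, so it is get?
def pvALoop (d : PySem.Dict String (List Int)) (mystery : List Int) : List String → String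
  | [] => "No match"
  | name :: rest => if d.get? name = some mystery then name else pvALoop d mystery rest

def identify_dna (mystery_dna : String) (STR : List String) (profiles : List (String × List Int)) : String :=
  let mystery_strs := STR.foldl (fun acc s => acc ++ [find_max_consecutive mystery_dna s]) []
  pvALoop (PySem.Dict.ofList profiles) mystery_strs (PySem.Dict.ofList profiles).keys

-- ===== PORT B =====
def pvBCount (dna target : String) : Int :=
  let dl := dna.toList
  let tl := target.toList
  let n : Int := dl.length
  let t : Int := tl.length
  (PySem.List.pyRange 0 t 1).foldl (fun best r =>
    (((PySem.List.pyRange r n t).reverse).foldl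
      (fun (st : Int × Int) j =>
        if PySem.List.slice dl (some j) (some (j + t)) = tl then
          (st.1 + 1, if st.1 + 1 > st.2 then st.1 + 1 else st.2)
        else (0, st.2))
      (0, best)).2) 0

def identify_dna_alt (mystery_dna : String) (STR : List String) (profiles : List (String × List Int)) : String :=
  let counts := STR.map (fun s => pvBCount mystery_dna s)
  match (PySem.Dict.ofList profiles).items.find? (fun p => p.2 == counts) with
  | some p => p.1
  | none => "No match"

-- ===== PRECONDITION & SPEC =====
-- Pre_ excludes exactly the inputs on which A never returns: an empty string in STR together with
-- a non-empty mystery_dna makes A's inner 'while' loop run forever (the empty slice always equals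
-- the empty target).
def Pre_identify_dna (mystery_dna : String) (STR : List String) (profiles : List (String × List Int)) : Prop :=
  mystery_dna = "" ∨ ¬ ("" ∈ STR)
instance (mystery_dna : String) (STR : List String) (profiles : List (String × List Int)) : Decidable (Pre_identify_dna mystery_dna STR profiles) := by unfold Pre_identify_dna; infer_instance

def pvWitness_identify_dna : String × List String × (List (String × List Int)) :=
  ("ACACT", ["AC", "T"], [("Bob", [2, 1]), ("Eve", [0, 0])])

def Spec_identify_dna (mystery_dna : String) (STR : List String) (profiles : List (String × List Int)) (out : String) : Prop := out = identify_dna_alt mystery_dna STR profiles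
instance (mystery_dna : String) (STR : List String) (profiles : List (String × List Int)) (out : String) : Decidable (Spec_identify_dna mystery_dna STR profiles out) := by unfold Spec_identify_dna; infer_instance

-- ===== CLAIM (what is proved, stated in full; the proofs are below) =====
def Claim_equal_identify_dna : Prop := ∀ (mystery_dna : String) (STR : List String) (profiles : List (String × List Int)), Dom_identify_dna mystery_dna STR profiles → Pre_identify_dna mystery_dna STR profiles → Spec_identify_dna mystery_dna STR profiles (identify_dna mystery_dna STR profiles)

-- ===== LEMMAS AND PROOFS =====

-- number of consecutive copies of tl in dl starting at position i (the semantic yardstick both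
-- ports are measured against)
def pvK (dl tl : List Char) (i : Nat) : Nat :=
  if h : tl ≠ [] ∧ (dl.drop i).take tl.length = tl then pvK dl tl (i + tl.length) + 1 else 0
  termination_by dl.length - i
  decreasing_by
    have hlen : ((dl.drop i).take tl.length).length = tl.length := by rw [h.2]
    simp [List.length_take, List.length_drop] at hlen
    have ht : 0 < tl.length := List.length_pos_iff.mpr h.1
    omega

def pvMaxFold (dl tl : List Char) (b : Int) (L : List Nat) : Int :=
  L.foldl (fun m i => max m ((pvK dl tl i : Int))) b

def pvStepN (dl tl : List Char) (st : Int × Int) (j : Nat) : Int × Int :=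
  if (dl.drop j).take tl.length = tl then
    (st.1 + 1, if st.1 + 1 > st.2 then st.1 + 1 else st.2)
  else (0, st.2)

def pvChain (t r cnt : Nat) : List Nat := (List.range cnt).map (fun k => r + t * k)

def pvCnt (n t r : Nat) : Nat :=
  if (r : Int) < (n : Int) then (((n : Int) - r + t - 1) / t).toNat else 0

def pvLb (n t : Nat) : List Nat :=
  (List.range t).flatMap (fun r => (pvChain t r (pvCnt n t r)).reverse)

theorem pvK_match (dl tl : List Char) (i : Nat) (htl : tl ≠ [])
    (hm : (dl.drop i).take tl.length = tl) :
    pvK dl tl i = pvK dl tl (i + tl.length) + 1 := by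
  rw [pvK]; simp [htl, hm]

theorem pvK_nomatch (dl tl : List Char) (i : Nat)
    (hm : ¬ (dl.drop i).take tl.length = tl) :
    pvK dl tl i = 0 := by
  rw [pvK]; simp [hm]

theorem pvK_le (dl tl : List Char) (htl : tl ≠ []) :
    ∀ fuel i, dl.length - i ≤ fuel → pvK dl tl i ≤ dl.length - i := by
  intro fuel
  induction fuel with
  | zero =>
      intro i hi
      by_cases hm : (dl.drop i).take tl.length = tl
      · have hlen : ((dl.drop i).take tl.length).length = tl.length := by rw [hm]
        simp [List.length_take, List.length_drop] at hlen
        have ht : 0 < tl.length := List.length_pos_iff.mpr htl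
        omega
      · rw [pvK_nomatch dl tl i hm]; omega
  | succ f ih =>
      intro i hi
      by_cases hm : (dl.drop i).take tl.length = tl
      · have hlen : ((dl.drop i).take tl.length).length = tl.length := by rw [hm]
        simp [List.length_take, List.length_drop] at hlen
        have ht : 0 < tl.length := List.length_pos_iff.mpr htl
        rw [pvK_match dl tl i htl hm]
        have := ih (i + tl.length) (by omega)
        omega
      · rw [pvK_nomatch dl tl i hm]; omega

theorem pvK_zero_of_ge (dl tl : List Char) (htl : tl ≠ []) (i : Nat)
    (hi : dl.length ≤ i) : pvK dl tl i = 0 := by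
  have := pvK_le dl tl htl (dl.length - i) i (by omega)
  omega

theorem pvAWhile_eq (dl tl : List Char) (htl : tl ≠ []) :
    ∀ (fuel : Nat) (i c : Nat) (m : Int),
      pvK dl tl (i + tl.length * c) < fuel → (c : Int) ≤ m →
      pvAWhile dl tl (i : Int) fuel (c : Int) m
        = max m ((c : Int) + (pvK dl tl (i + tl.length * c) : Int)) := by
  intro fuel
  induction fuel with
  | zero => intro i c m hf hc; omega
  | succ f ih =>
      intro i c m hf hc
      have hcast : ((i : Int) + (tl.length : Int) * (c : Int))
          = ((i + tl.length * c : Nat) : Int) := by push_cast; ring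
      by_cases hm : (dl.drop (i + tl.length * c)).take tl.length = tl
      · have hk := pvK_match dl tl (i + tl.length * c) htl hm
        have harg : i + tl.length * c + tl.length = i + tl.length * (c + 1) := by ring
        rw [harg] at hk
        have hstep : pvAWhile dl tl (i : Int) (f + 1) (c : Int) m
            = pvAWhile dl tl (i : Int) f ((c : Int) + 1)
                (if (c : Int) + 1 > m then (c : Int) + 1 else m) := by
          show (if PySem.List.slice dl _ _ = tl then _ else _) = _
          rw [hcast, PySem.List.slice_natCast_add dl (i + tl.length * c) tl.length]
          simp [hm]
        rw [hstep]
        have h1 : ((c : Int) + 1) = (((c + 1 : Nat)) : Int) := by push_cast; ring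
        rw [h1]
        rw [ih i (c + 1) (if (((c + 1 : Nat)) : Int) > m then (((c + 1 : Nat)) : Int) else m)
          (by omega) (by split <;> omega)]
        rw [hk]
        push_cast
        simp only [Int.max_def]
        split_ifs <;> omega
      · have hk := pvK_nomatch dl tl (i + tl.length * c) hm
        have hstep : pvAWhile dl tl (i : Int) (f + 1) (c : Int) m = m := by
          show (if PySem.List.slice dl _ _ = tl then _ else _) = _
          rw [hcast, PySem.List.slice_natCast_add dl (i + tl.length * c) tl.length]
          simp [hm]
        rw [hstep, hk]
        simp [Int.max_def]
        omega

theorem pvFoldA (dl tl : List Char) (htl : tl ≠ []) :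
    ∀ (L : List Nat) (m : Int), 0 ≤ m →
      L.foldl (fun m (i : Nat) => pvAWhile dl tl ((i : Nat) : Int) (dl.length + 1) 0 m) m
        = pvMaxFold dl tl m L := by
  intro L
  induction L with
  | nil => intro m _; rfl
  | cons a L ih =>
      intro m hm
      have hk : pvK dl tl (a + tl.length * 0) < dl.length + 1 := by
        simp only [Nat.mul_zero, Nat.add_zero]
        have := pvK_le dl tl htl (dl.length - a) a (by omega)
        omega
      have h0 : ((0 : Nat) : Int) = (0 : Int) := rfl
      have := pvAWhile_eq dl tl htl (dl.length + 1) a 0 m hk (by omega)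
      simp only [Nat.mul_zero, Nat.add_zero, Nat.cast_zero, zero_add] at this
      show List.foldl _ (pvAWhile dl tl (a : Int) (dl.length + 1) 0 m) L = _
      rw [this, pvMaxFold]
      simp only [List.foldl_cons]
      rw [← pvMaxFold, ih (max m (pvK dl tl a)) (by omega)]

theorem pvA_eq_maxFold (dna target : String) (htl : target.toList ≠ []) :
    find_max_consecutive dna target
      = pvMaxFold dna.toList target.toList 0 (List.range dna.toList.length) := by
  rw [find_max_consecutive, PySem.List.pyRange_one]
  simp only [Int.sub_zero, Int.toNat_natCast, List.foldl_map, Int.zero_add]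
  exact pvFoldA dna.toList target.toList htl (List.range dna.toList.length) 0 le_rfl

theorem pvCnt_ge (n t r : Nat) (ht : 0 < t) : n ≤ r + t * pvCnt n t r := by
  rw [pvCnt]
  split
  · rename_i hrn
    set D : Int := (n : Int) - r + t - 1 with hD
    have hdm := Int.ediv_add_emod D t
    have he0 : 0 ≤ D % t := Int.emod_nonneg D (by omega)
    have he1 : D % t < t := Int.emod_lt_of_pos D (by omega)
    have hq0 : 0 ≤ D / t := by
      by_contra h
      push_neg at h
      have : (t : Int) * (D / t) ≤ t * (-1) := by
        apply mul_le_mul_of_nonneg_left (by omega) (by omega)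
      omega
    have hP : ((t * (D / t).toNat : Nat) : Int) = t * (D / t) := by
      push_cast
      rw [Int.toNat_of_nonneg hq0]
    have key : ((t * (D / t).toNat : Nat) : Int) = D - D % t := by omega
    omega
  · rename_i hrn
    omega

theorem pvCnt_lt (n t r k : Nat) (ht : 0 < t) (hk : k < pvCnt n t r) : r + t * k < n := by
  rw [pvCnt] at hk
  split at hk
  · rename_i hrn
    set D : Int := (n : Int) - r + t - 1 with hD
    have hdm := Int.ediv_add_emod D t
    have he0 : 0 ≤ D % t := Int.emod_nonneg D (by omega)
    have he1 : D % t < t := Int.emod_lt_of_pos D (by omega)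
    have hq0 : 0 ≤ D / t := by
      by_contra h
      push_neg at h
      have hc : (D / t).toNat = 0 := by omega
      omega
    have hkq : (k : Int) ≤ D / t - 1 := by
      have : (k : Int) < (D / t).toNat := by exact_mod_cast hk
      omega
    have hmul : (t : Int) * k ≤ t * (D / t - 1) :=
      mul_le_mul_of_nonneg_left hkq (by omega)
    have hP : ((t * k : Nat) : Int) = (t : Int) * k := by push_cast; ring
    have key : ((t * k : Nat) : Int) ≤ D - D % t - t := by
      rw [hP]
      have : (t : Int) * (D / t - 1) = t * (D / t) - t := by ring
      omega
    omega
  · omega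

theorem mem_pvLb (n t : Nat) (ht : 0 < t) (i : Nat) : i ∈ pvLb n t ↔ i < n := by
  rw [pvLb]
  simp only [List.mem_flatMap, List.mem_range, List.mem_reverse, pvChain, List.mem_map]
  constructor
  · rintro ⟨r, hr, k, hk, rfl⟩
    exact pvCnt_lt n t r k ht hk
  · intro hi
    refine ⟨i % t, Nat.mod_lt i ht, i / t, ?_, ?_⟩
    · by_contra h
      push_neg at h
      have h1 := Nat.mul_le_mul_left t h
      have h2 := pvCnt_ge n t (i % t) ht
      have h3 : i % t + t * (i / t) = i := Nat.mod_add_div i t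
      omega
    · exact Nat.mod_add_div i t

theorem pvChainFold (dl tl : List Char) (htl : tl ≠ []) :
    ∀ (cnt r : Nat) (b : Int), 0 ≤ b →
      ((pvChain tl.length r cnt).reverse).foldl (pvStepN dl tl)
          ((pvK dl tl (r + tl.length * cnt) : Int), b)
        = ((pvK dl tl r : Int), pvMaxFold dl tl b ((pvChain tl.length r cnt).reverse)) := by
  intro cnt
  induction cnt with
  | zero => intro r b _; simp [pvChain, pvMaxFold]
  | succ c ih =>
      intro r b hb
      have hsplit : pvChain tl.length r (c + 1)
          = pvChain tl.length r c ++ [r + tl.length * c] := by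
        rw [pvChain, pvChain, List.range_succ, List.map_append]
        rfl
      rw [hsplit, List.reverse_append]
      simp only [List.reverse_singleton, List.singleton_append, List.foldl_cons]
      set j := r + tl.length * c with hj
      have harg : r + tl.length * (c + 1) = j + tl.length := by rw [hj]; ring
      have hstate : pvStepN dl tl ((pvK dl tl (r + tl.length * (c + 1)) : Int), b) j
          = ((pvK dl tl j : Int), max b (pvK dl tl j)) := by
        rw [pvStepN]
        by_cases hm : (dl.drop j).take tl.length = tl
        · rw [pvK_match dl tl j htl hm, harg]
          simp only [hm, if_true, Prod.mk.injEq]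
          refine ⟨by push_cast; ring, ?_⟩
          push_cast
          simp only [Int.max_def]
          split_ifs <;> omega
        · rw [pvK_nomatch dl tl j hm]
          simp only [hm, if_false, Prod.mk.injEq, Nat.cast_zero]
          refine ⟨by trivial, ?_⟩
          simp only [Int.max_def]
          split_ifs <;> omega
      rw [hstate, ih r (max b (pvK dl tl j)) (by omega)]
      simp only [pvMaxFold, List.foldl_cons]

theorem pvMaxFold_ge (dl tl : List Char) (b : Int) (L : List Nat) :
    b ≤ pvMaxFold dl tl b L :=
  (PySem.List.le_foldl_max_int L (fun i => ((pvK dl tl i : Nat) : Int)) b).1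

theorem pvMaxFold_mem_le (dl tl : List Char) (b : Int) (L : List Nat) :
    ∀ i ∈ L, ((pvK dl tl i : Nat) : Int) ≤ pvMaxFold dl tl b L :=
  (PySem.List.le_foldl_max_int L (fun i => ((pvK dl tl i : Nat) : Int)) b).2

theorem pvMaxFold_append (dl tl : List Char) (b : Int) (l1 l2 : List Nat) :
    pvMaxFold dl tl b (l1 ++ l2) = pvMaxFold dl tl (pvMaxFold dl tl b l1) l2 := by
  simp [pvMaxFold, List.foldl_append]

theorem pvMaxFold_le (dl tl : List Char) :
    ∀ (L : List Nat) (m M : Int), m ≤ M → (∀ i ∈ L, ((pvK dl tl i : Nat) : Int) ≤ M) →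
      pvMaxFold dl tl m L ≤ M := by
  intro L
  induction L with
  | nil => intro m M hm _; exact hm
  | cons a L ih =>
      intro m M hm hL
      rw [pvMaxFold]
      simp only [List.foldl_cons]
      rw [← pvMaxFold]
      exact ih _ M (by
        have := hL a (List.mem_cons_self)
        omega) (fun i hi => hL i (List.mem_cons_of_mem a hi))

theorem pvMaxFold_eq_of_mem (dl tl : List Char) (L1 L2 : List Nat)
    (h : ∀ i, i ∈ L1 ↔ i ∈ L2) :
    pvMaxFold dl tl 0 L1 = pvMaxFold dl tl 0 L2 := by
  apply le_antisymm
  · exact pvMaxFold_le dl tl L1 0 _ (pvMaxFold_ge dl tl 0 L2)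
      (fun i hi => pvMaxFold_mem_le dl tl 0 L2 i ((h i).mp hi))
  · exact pvMaxFold_le dl tl L2 0 _ (pvMaxFold_ge dl tl 0 L1)
      (fun i hi => pvMaxFold_mem_le dl tl 0 L1 i ((h i).mpr hi))

theorem pvFoldB (dl tl : List Char) (htl : tl ≠ []) :
    ∀ (rs : List Nat) (b : Int), 0 ≤ b →
      rs.foldl (fun best r =>
          (((pvChain tl.length r (pvCnt dl.length tl.length r)).reverse).foldl
            (pvStepN dl tl) (0, best)).2) b
        = pvMaxFold dl tl b
            (rs.flatMap (fun r => (pvChain tl.length r (pvCnt dl.length tl.length r)).reverse)) := by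
  intro rs
  induction rs with
  | nil => intro b _; rfl
  | cons r rs ih =>
      intro b hb
      simp only [List.foldl_cons, List.flatMap_cons]
      have h0 : ((0 : Int)) = ((pvK dl tl (r + tl.length * pvCnt dl.length tl.length r) : Nat) : Int) := by
        rw [pvK_zero_of_ge dl tl htl _ (pvCnt_ge dl.length tl.length r
          (List.length_pos_iff.mpr htl))]
        rfl
      rw [show ((0 : Int), b) = (((pvK dl tl (r + tl.length * pvCnt dl.length tl.length r) : Nat) : Int), b) by rw [← h0]]
      rw [pvChainFold dl tl htl _ r b hb]
      rw [ih _ (le_trans hb (pvMaxFold_ge dl tl b _)), pvMaxFold_append]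

theorem pvB_eq_maxFold (dna target : String) (htl : target.toList ≠ []) :
    pvBCount dna target
      = pvMaxFold dna.toList target.toList 0 (pvLb dna.toList.length target.toList.length) := by
  have ht : 0 < target.toList.length := List.length_pos_iff.mpr htl
  rw [pvBCount]
  rw [PySem.List.pyRange_one]
  simp only [Int.sub_zero, Int.toNat_natCast, List.foldl_map, Int.zero_add]
  have hinner : ∀ (r : Nat) (best : Int),
      (((PySem.List.pyRange (r : Int) (dna.toList.length : Int) (target.toList.length : Int)).reverse).foldl
        (fun (st : Int × Int) j =>
          if PySem.List.slice dna.toList (some j) (some (j + (target.toList.length : Int))) = target.toList then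
            (st.1 + 1, if st.1 + 1 > st.2 then st.1 + 1 else st.2)
          else (0, st.2))
        (0, best)).2
      = (((pvChain target.toList.length r (pvCnt dna.toList.length target.toList.length r)).reverse).foldl
          (pvStepN dna.toList target.toList) (0, best)).2 := by
    intro r best
    rw [PySem.List.pyRange_of_pos (r : Int) (dna.toList.length : Int) (by exact_mod_cast ht)]
    have hcnt : (if (r : Int) < (dna.toList.length : Int) then
        (((dna.toList.length : Int) - r + target.toList.length - 1) / target.toList.length).toNat else 0)
        = pvCnt dna.toList.length target.toList.length r := by
      rw [pvCnt]
    rw [hcnt]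
    have hmap : (List.range (pvCnt dna.toList.length target.toList.length r)).map
        (fun (k : Nat) => (r : Int) + (target.toList.length : Int) * ((k : Nat) : Int))
        = (pvChain target.toList.length r (pvCnt dna.toList.length target.toList.length r)).map
            (fun (j : Nat) => ((j : Nat) : Int)) := by
      rw [pvChain, List.map_map]
      apply List.map_congr_left
      intro k _
      simp only [Function.comp]
      push_cast
      ring
    rw [hmap, ← List.map_reverse, List.foldl_map]
    refine congrArg Prod.snd ?_
    apply List.foldl_ext
    intro st j _
    rw [pvStepN]
    have : PySem.List.slice dna.toList (some (j : Int)) (some ((j : Int) + (target.toList.length : Int)))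
        = (dna.toList.drop j).take target.toList.length :=
      PySem.List.slice_natCast_add dna.toList j target.toList.length
    rw [this]
  refine Eq.trans (List.foldl_ext _
    (fun best (r : Nat) =>
      (((pvChain target.toList.length r (pvCnt dna.toList.length target.toList.length r)).reverse).foldl
        (pvStepN dna.toList target.toList) (0, best)).2)
    0 (fun b r _ => hinner r b)) ?_
  rw [pvFoldB dna.toList target.toList htl (List.range target.toList.length) 0 le_rfl]
  rfl

theorem pvCount_eq (dna target : String) (h : dna = "" ∨ target ≠ "") :
    find_max_consecutive dna target = pvBCount dna target := by
  by_cases htg : target = ""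
  · have hdna : dna = "" := by
      rcases h with h | h
      · exact h
      · exact absurd htg h
    subst hdna; subst htg
    decide
  · have htl : target.toList ≠ [] := by
      intro hc
      exact htg (String.toList_eq_nil_iff.mp hc)
    rw [pvA_eq_maxFold dna target htl, pvB_eq_maxFold dna target htl]
    apply pvMaxFold_eq_of_mem
    intro i
    rw [List.mem_range, mem_pvLb dna.toList.length target.toList.length
      (List.length_pos_iff.mpr htl) i]

theorem pvLoop_eq_find (d : PySem.Dict String (List Int)) (v : List Int) :
    ∀ (L : List (String × List Int)), (∀ p ∈ L, d.get? p.1 = some p.2) →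
      pvALoop d v (L.map Prod.fst)
        = (match L.find? (fun p => p.2 == v) with
           | some p => p.1
           | none => "No match") := by
  intro L
  induction L with
  | nil => intro _; rfl
  | cons p L ih =>
      intro hsub
      have hp := hsub p (List.mem_cons_self)
      simp only [List.map_cons, List.find?_cons]
      show (if d.get? p.1 = some v then p.1 else pvALoop d v (L.map Prod.fst)) = _
      by_cases hv : p.2 = v
      · subst hv
        simp [hp]
      · have h1 : ¬ d.get? p.1 = some v := by
          rw [hp]
          intro hc
          exact hv (Option.some.inj hc)
        have h2 : (fun p => p.2 == v) p = false := by
          simp [hv]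
        simp only [h1, if_false, h2]
        exact ih (fun q hq => hsub q (List.mem_cons_of_mem p hq))

-- ===== VERDICT (by name: the statement is the Claim_ definition above) =====
theorem identify_dna_spec : Claim_equal_identify_dna := by
  intro mystery_dna STR profiles _ hpre
  unfold Spec_identify_dna identify_dna identify_dna_alt
  simp only [PySem.List.foldl_append_singleton_eq_map, List.nil_append]
  have hcounts : STR.map (find_max_consecutive mystery_dna)
      = STR.map (fun s => pvBCount mystery_dna s) := by
    apply List.map_congr_left
    intro s hs
    apply pvCount_eq
    rcases hpre with h | h
    · exact Or.inl h
    · exact Or.inr (fun hc => h (hc ▸ hs))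
  rw [hcounts]
  set counts := STR.map (fun s => pvBCount mystery_dna s)
  have hkeys : (PySem.Dict.ofList profiles).keys
      = (PySem.Dict.ofList profiles).items.map Prod.fst := rfl
  rw [hkeys]
  rw [pvLoop_eq_find (PySem.Dict.ofList profiles) counts
    (PySem.Dict.ofList profiles).items
    (fun p hp => PySem.Dict.get?_of_mem_items (PySem.Dict.ofList profiles)
      (by exact hp) (PySem.Dict.nodup_keys_ofList profiles))]
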